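-- pv_equiv track=rewrite | github.com/feelixs/find-song | misc.py | clear_formatting
-- ===== SOURCE A (Python) =====
-- def clear_formatting(string) -> str:
--     word = ""
--     if "]" in string:
--         skip_text = False
--     else:
--         skip_text = True
--     for letter in string:
--         if letter == "]":
--             skip_text = True
--         if letter != "[" and letter != "]" and letter != "(" and letter != ")" and skip_text:
--             word += letter
--     return word
-- ===== SOURCE B (Python) =====
-- def clear_formatting(string) -> str:
--     tail = string.split("]", 1)[1] if "]" in string else string
--     return "".join(c for c in tail if c not in "[]()")
-- ===== Notes on version B (the rewrite author's own statement) =====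
-- stated objective: simpler
-- what changed: Replaces A's single-pass skip_text flag loop (with char-by-char string concatenation) by an explicit decomposition: split off the suffix after the first ']' (or keep the whole string if none), then filter out bracket characters via join.
import Mathlib
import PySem

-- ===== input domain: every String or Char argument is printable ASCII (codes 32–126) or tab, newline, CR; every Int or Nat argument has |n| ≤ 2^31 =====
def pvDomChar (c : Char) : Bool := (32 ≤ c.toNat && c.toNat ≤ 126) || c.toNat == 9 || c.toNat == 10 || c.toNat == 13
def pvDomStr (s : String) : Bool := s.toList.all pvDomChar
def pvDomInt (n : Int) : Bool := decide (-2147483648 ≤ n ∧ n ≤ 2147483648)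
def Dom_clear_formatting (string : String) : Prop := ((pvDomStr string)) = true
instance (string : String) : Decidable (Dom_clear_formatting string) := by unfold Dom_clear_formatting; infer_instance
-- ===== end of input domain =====

-- B replaces A's skip_text-flag loop by a split-after-first-']' then filter decomposition (objective: simpler).

-- ===== PORT A =====
-- one step of A's for-loop: update skip_text, then conditionally append the letter
def pvAStep (s : Bool × List Char) (letter : Char) : Bool × List Char :=
  let skip := if letter = ']' then true else s.1
  (skip,
    if letter ≠ '[' && letter ≠ ']' && letter ≠ '(' && letter ≠ ')' && skip then
      s.2 ++ [letter]
    else s.2)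

def clear_formatting (string : String) : String :=
  let skip0 : Bool := if ']' ∈ string.toList then false else true
  String.ofList ((string.toList.foldl pvAStep (skip0, [])).2)

-- ===== PORT B =====
-- `c not in "[]()"`
def pvKeep (c : Char) : Bool := !(c ∈ ['[', ']', '(', ')'])

def clear_formatting_alt (string : String) : String :=
  let l := string.toList
  -- tail = string.split("]", 1)[1] if "]" in string else string
  let tail := if ']' ∈ l then (l.dropWhile (· ≠ ']')).tail else l
  String.ofList (tail.filter pvKeep)

-- ===== PRECONDITION & SPEC =====
def Spec_clear_formatting (string : String) (out : String) : Prop := out = clear_formatting_alt string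
instance (string : String) (out : String) : Decidable (Spec_clear_formatting string out) := by unfold Spec_clear_formatting; infer_instance

-- ===== CLAIM (what is proved, stated in full; the proofs are below) =====
def Claim_equal_clear_formatting : Prop := ∀ (string : String), Dom_clear_formatting string → Spec_clear_formatting string (clear_formatting string)

-- ===== LEMMAS AND PROOFS =====

theorem pvFoldl_true (l : List Char) (acc : List Char) :
    (l.foldl pvAStep (true, acc)).2 = acc ++ l.filter pvKeep := by
  induction l generalizing acc with
  | nil => simp
  | cons c l ih =>
    simp only [List.foldl_cons, List.filter_cons, pvAStep, pvKeep]
    by_cases h : c ∈ ['[', ']', '(', ')']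
    · fin_cases h <;> simp [ih]
    · simp only [List.mem_cons, List.not_mem_nil, or_false] at h
      push Not at h
      obtain ⟨h1, h2, h3, h4⟩ := h
      simp [h1, h2, h3, h4, ih]

theorem pvFoldl_false (l : List Char) (acc : List Char) :
    (l.foldl pvAStep (false, acc)).2
      = acc ++ ((l.dropWhile (· ≠ ']')).tail).filter pvKeep := by
  induction l generalizing acc with
  | nil => simp
  | cons c l ih =>
    by_cases h : c = ']'
    · subst h
      simp [pvAStep, pvFoldl_true, List.dropWhile]
    · simp [pvAStep, h, ih, List.dropWhile]

-- ===== VERDICT (by name: the statement is the Claim_ definition above) =====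
theorem clear_formatting_spec : Claim_equal_clear_formatting := by
  intro string _
  unfold Spec_clear_formatting clear_formatting clear_formatting_alt
  by_cases h : ']' ∈ string.toList
  · simp [h, pvFoldl_false]
  · simp [h, pvFoldl_true]
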